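-- pv_equiv track=rewrite | github.com/markwu53/zillow | eqaul_split.py | cat_long2
-- ===== SOURCE A (Python) =====
-- def cat_long2(value):
--     try:
--         value = int(value)
--     except:
--         return 0
--     points = [
--               -119500000,
--               -119000000,
--               # add step 3 points
--               -118750000,
--               -118500000,
--               # add step 3 points
--               -118250000,
--               -118000000,
--               # add step 3 points
--               -117750000,
--               -117500000,
--               ]
--     points = list(set(points))
--     points.sort()
--     for p in range(len(points)):
--         if value < points[p]: return p
--     return 0
-- ===== SOURCE B (Python) =====
-- def cat_long2(value):
--     try:
--         value = int(value)
--     except Exception: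
--         return 0
--     points = [
--               -119500000,
--               -119000000,
--               -118750000,
--               -118500000,
--               -118250000,
--               -118000000,
--               -117750000,
--               -117500000,
--               ]
--     lo, hi = 0, len(points)
--     while lo < hi:
--         mid = (lo + hi) // 2
--         if value < points[mid]:
--             hi = mid
--         else:
--             lo = mid + 1
--     return 0 if lo == len(points) else lo
-- ===== Notes on version B (the rewrite author's own statement) =====
-- stated objective: alternative
-- what changed: Replaced the linear scan over the sorted threshold table with a hand-written binary search (bisect_right), mapping the above-all case (lo == len) to the same 0 sentinel; the set/sort construction is dropped since the table is already distinct and sorted.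
import Mathlib
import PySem

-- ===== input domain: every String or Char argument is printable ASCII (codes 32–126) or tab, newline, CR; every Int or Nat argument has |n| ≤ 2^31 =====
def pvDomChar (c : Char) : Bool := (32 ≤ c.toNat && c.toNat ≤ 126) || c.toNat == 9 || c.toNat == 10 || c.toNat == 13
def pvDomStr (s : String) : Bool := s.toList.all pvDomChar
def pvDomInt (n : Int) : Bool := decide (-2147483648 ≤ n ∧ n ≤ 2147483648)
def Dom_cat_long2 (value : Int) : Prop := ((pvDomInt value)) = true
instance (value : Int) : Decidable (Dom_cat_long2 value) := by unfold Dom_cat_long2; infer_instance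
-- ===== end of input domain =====

-- B replaces A's linear scan of the sorted threshold table with a hand-written binary search (alternative).
-- On an Int argument Python's int(value) never raises, so A's try/except guard is the identity here.

-- ===== PORT A =====
-- for p in range(len(points)): if value < points[p]: return p  /  return 0
-- (p is drawn from range(len(points)), so it is always in range and the getD default is never used)
def catLoopA (points : List Int) (value : Int) : List Nat → Int
  | [] => 0
  | p :: rest => if value < points.getD p 0 then (p : Int) else catLoopA points value rest

def cat_long2 (value : Int) : Int :=
  let points : List Int :=
    [-119500000, -119000000, -118750000, -118500000,
     -118250000, -118000000, -117750000, -117500000]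
  let points := PySem.Set.ofList points               -- list(set(points))
  let points := PySem.List.sorted points (fun x => x) -- points.sort()
  catLoopA points value (List.range points.length)

-- ===== PORT B =====
-- while lo < hi: mid = (lo+hi)//2; if value < points[mid]: hi = mid else: lo = mid+1
-- (lo ≤ mid < hi ≤ len always holds, so the getD default is never used)
def bsrB (points : List Int) (value : Int) (lo hi : Nat) : Nat :=
  if lo < hi then
    let mid := (lo + hi) / 2
    if value < points.getD mid 0 then bsrB points value lo mid
    else bsrB points value (mid + 1) hi
  else lo
termination_by hi - lo
decreasing_by all_goals omega

def cat_long2_alt (value : Int) : Int :=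
  let points : List Int :=
    [-119500000, -119000000, -118750000, -118500000,
     -118250000, -118000000, -117750000, -117500000]
  let lo := bsrB points value 0 points.length
  if lo = points.length then 0 else (lo : Int)

-- ===== PRECONDITION & SPEC =====
def Spec_cat_long2 (value : Int) (out : Int) : Prop := out = cat_long2_alt value
instance (value : Int) (out : Int) : Decidable (Spec_cat_long2 value out) := by unfold Spec_cat_long2; infer_instance

-- ===== CLAIM (what is proved, stated in full; the proofs are below) =====
def Claim_equal_cat_long2 : Prop := ∀ (value : Int), Dom_cat_long2 value → Spec_cat_long2 value (cat_long2 value)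

-- ===== LEMMAS AND PROOFS =====

-- A's set/sort pipeline leaves the (already distinct and sorted) table unchanged.
lemma pts_eq : PySem.List.sorted (PySem.Set.ofList
    [(-119500000 : Int), -119000000, -118750000, -118500000,
     -118250000, -118000000, -117750000, -117500000]) (fun x => x)
    = [(-119500000 : Int), -119000000, -118750000, -118500000,
       -118250000, -118000000, -117750000, -117500000] := by decide

-- Invariant of B's binary search: it returns a split point of [lo, hi) for a
-- list monotone in getD: every index below the result holds a value ≤ v, every
-- index from the result up to hi holds a value > v.
lemma bsr_spec (xs : List Int) (v : Int)
    (hs : ∀ i j : Nat, i ≤ j → j < xs.length → xs.getD i 0 ≤ xs.getD j 0) :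
    ∀ fuel lo hi : Nat, hi - lo ≤ fuel → lo ≤ hi → hi ≤ xs.length →
      (lo ≤ bsrB xs v lo hi ∧ bsrB xs v lo hi ≤ hi) ∧
      (∀ j : Nat, lo ≤ j → j < bsrB xs v lo hi → xs.getD j 0 ≤ v) ∧
      (∀ j : Nat, bsrB xs v lo hi ≤ j → j < hi → v < xs.getD j 0) := by
  intro fuel
  induction fuel with
  | zero =>
    intro lo hi h1 h2 _
    have : hi = lo := by omega
    subst this
    rw [bsrB]
    simp only [lt_irrefl, if_false]
    exact ⟨⟨le_refl _, le_refl _⟩, fun j h1 h2 => by omega, fun j h1 h2 => by omega⟩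
  | succ n ih =>
    intro lo hi h1 h2 h3
    rw [bsrB]
    by_cases hlt : lo < hi
    · simp only [hlt, if_true]
      by_cases hv : v < xs.getD ((lo + hi) / 2) 0
      · simp only [hv, if_true]
        have hmid1 : lo ≤ (lo + hi) / 2 := by omega
        have hmid2 : (lo + hi) / 2 < hi := by omega
        obtain ⟨hb, hle, hgt⟩ := ih lo ((lo + hi) / 2) (by omega) (by omega) (by omega)
        refine ⟨⟨hb.1, by omega⟩, hle, ?_⟩
        intro j hj1 hj2
        by_cases hjm : j < (lo + hi) / 2
        · exact hgt j hj1 hjm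
        · exact lt_of_lt_of_le hv (hs _ j (by omega) (by omega))
      · simp only [hv, if_false]
        have hmid1 : lo ≤ (lo + hi) / 2 := by omega
        have hmid2 : (lo + hi) / 2 < hi := by omega
        obtain ⟨hb, hle, hgt⟩ := ih ((lo + hi) / 2 + 1) hi (by omega) (by omega) h3
        refine ⟨⟨by omega, hb.2⟩, ?_, hgt⟩
        intro j hj1 hj2
        by_cases hjm : (lo + hi) / 2 + 1 ≤ j
        · exact hle j hjm hj2
        · exact le_trans (hs j _ (by omega) (by omega)) (not_lt.mp hv)
    · simp only [hlt, if_false]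
      exact ⟨⟨le_refl _, h2⟩, by omega, by omega⟩

-- A's linear scan, run on the index suffix [a, a+k) with every earlier value ≤ v,
-- stops exactly at r (the first index whose value exceeds v), or returns 0 when
-- there is none.
lemma scan_eval (xs : List Int) (v : Int) (r : Nat)
    (h1 : ∀ j : Nat, j < r → xs.getD j 0 ≤ v)
    (h2 : r < xs.length → v < xs.getD r 0) (hr : r ≤ xs.length) :
    ∀ k a : Nat, a + k = xs.length → a ≤ r →
      catLoopA xs v (List.range' a k) = if r = xs.length then 0 else (r : Int) := by
  intro k
  induction k with
  | zero =>
    intro a ha har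
    have : r = xs.length := by omega
    simp [this, catLoopA]
  | succ n ih =>
    intro a ha har
    rw [List.range'_succ]
    by_cases heq : a = r
    · subst heq
      have hlt : a < xs.length := by omega
      simp only [catLoopA]
      rw [if_pos (h2 hlt), if_neg (by omega : ¬ a = xs.length)]
    · have : xs.getD a 0 ≤ v := h1 a (by omega)
      simp only [catLoopA, not_lt.mpr this, if_false]
      exact ih (a + 1) (by omega) (by omega)

-- The two loops agree on any list monotone in getD.
lemma main_eq (xs : List Int) (v : Int)
    (hs : ∀ i j : Nat, i ≤ j → j < xs.length → xs.getD i 0 ≤ xs.getD j 0) :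
    catLoopA xs v (List.range xs.length) =
      (if bsrB xs v 0 xs.length = xs.length then 0 else (bsrB xs v 0 xs.length : Int)) := by
  obtain ⟨⟨hb1, hb2⟩, hle, hgt⟩ := bsr_spec xs v hs xs.length 0 xs.length (by omega) (by omega) (le_refl _)
  rw [List.range_eq_range']
  exact scan_eval xs v _ (fun j hj => hle j (by omega) hj)
    (fun h => hgt _ (le_refl _) h) hb2 xs.length 0 (by omega) (by omega)

-- The threshold table is monotone in getD.
lemma hs_lit : ∀ i j : Nat, i ≤ j →
    j < ([(-119500000 : Int), -119000000, -118750000, -118500000,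
          -118250000, -118000000, -117750000, -117500000] : List Int).length →
    ([(-119500000 : Int), -119000000, -118750000, -118500000,
      -118250000, -118000000, -117750000, -117500000] : List Int).getD i 0 ≤
    ([(-119500000 : Int), -119000000, -118750000, -118500000,
      -118250000, -118000000, -117750000, -117500000] : List Int).getD j 0 := by
  intro i j hij hj
  simp only [List.length_cons, List.length_nil] at hj
  interval_cases j <;> interval_cases i <;> decide

-- ===== VERDICT (by name: the statement is the Claim_ definition above) =====
theorem cat_long2_spec : Claim_equal_cat_long2 := by
  intro v _
  unfold Spec_cat_long2 cat_long2 cat_long2_alt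
  simp only [pts_eq]
  exact main_eq _ v hs_lit
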